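-- pv_equiv track=rewrite | github.com/CodeRetreatTO/projects | 2015-12-quilt/cjmochrie_jason/quilt_attempt.py | connections
-- ===== SOURCE A (Python) =====
-- from collections import defaultdict
--
-- def connections(quilt):
--     """Return all possible connections"""
--     res = defaultdict(set)
--     rows = len(quilt)
--     cols = len(quilt[0])
--     for row_num, row in enumerate(quilt):
--         for col_num, cell in enumerate(row):
--             if row_num < rows - 1:
--                 res[cell].add(quilt[row_num + 1][col_num])
--             if row_num > 0:
--                 res[cell].add(quilt[row_num - 1][col_num])
--             if col_num < cols - 1:
--                 res[cell].add(quilt[row_num][col_num + 1])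
--             if col_num > 0:
--                 res[cell].add(quilt[row_num][col_num - 1])
--
--     for key in res.keys():
--         if key in res[key]:
--             res[key].remove(key)
--
--     return res
-- ===== SOURCE B (Python) =====
-- from collections import defaultdict
--
--
-- def connections(quilt):
--     """Return all possible connections"""
--     rows = len(quilt)
--     cols = len(quilt[0])
--     pos = {}
--     for i, row in enumerate(quilt):
--         for j, cell in enumerate(row):
--             pos.setdefault(cell, []).append((i, j))
--     res = defaultdict(set)
--     for key, cells in pos.items():
--         nbrs = []
--         for i, j in cells:
--             if i < rows - 1:
--                 nbrs.append(quilt[i + 1][j])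
--             if i > 0:
--                 nbrs.append(quilt[i - 1][j])
--             if j < cols - 1:
--                 nbrs.append(quilt[i][j + 1])
--             if j > 0:
--                 nbrs.append(quilt[i][j - 1])
--         if nbrs:
--             res[key] = set(nbrs) - {key}
--     return res
-- ===== Notes on version B (the rewrite author's own statement) =====
-- stated objective: alternative
-- what changed: B inverts A's loop structure: instead of one row-major pass that mutates a defaultdict set entry per neighbour and then a self-removal cleanup pass over the keys, B first groups the grid positions by cell value in one pass, then builds each value's finished neighbour set in one go from that value's own positions and stores it once via a set difference (no cleanup pass).
-- outside the precondition, e.g. on connections([]): A raises IndexError, B raises IndexError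
import Mathlib
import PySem

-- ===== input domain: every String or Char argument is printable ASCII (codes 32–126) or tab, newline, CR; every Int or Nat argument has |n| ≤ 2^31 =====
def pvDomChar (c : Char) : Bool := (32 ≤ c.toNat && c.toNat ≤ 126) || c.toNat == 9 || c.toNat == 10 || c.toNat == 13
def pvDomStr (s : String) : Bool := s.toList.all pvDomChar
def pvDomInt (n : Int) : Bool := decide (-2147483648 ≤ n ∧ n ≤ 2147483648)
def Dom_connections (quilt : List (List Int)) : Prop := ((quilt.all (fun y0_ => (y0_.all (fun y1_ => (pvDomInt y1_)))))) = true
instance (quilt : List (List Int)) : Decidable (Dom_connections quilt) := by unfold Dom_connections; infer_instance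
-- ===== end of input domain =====

-- B inverts A's loop structure: one pass groups the cell positions by cell value (first-seen order),
-- then each value's finished neighbour set is built in one go from its own positions and stored once
-- (the self-removal cleanup pass disappears into a set difference); same value, other decomposition.

-- ===== PORT A =====
def connections (quilt : List (List Int)) : List (Int × List Int) :=
  let res : PySem.Dict Int (PySem.Set Int) := PySem.Dict.empty
  let rows : Int := quilt.length
  -- len(quilt[0]) raises IndexError on quilt = []; excluded by Pre_, pyGetD is the total form
  let cols : Int := (PySem.List.pyGetD quilt 0 []).length
  let res := (PySem.List.enumerate quilt 0).foldl (fun res rc =>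
    (PySem.List.enumerate rc.2 0).foldl (fun res cc =>
      let res := if rc.1 < rows - 1 then
        res.modify cc.2 PySem.Set.empty (fun s =>
          s.add (PySem.List.pyGetD (PySem.List.pyGetD quilt (rc.1 + 1) []) cc.1 0)) else res
      let res := if rc.1 > 0 then
        res.modify cc.2 PySem.Set.empty (fun s =>
          s.add (PySem.List.pyGetD (PySem.List.pyGetD quilt (rc.1 - 1) []) cc.1 0)) else res
      let res := if cc.1 < cols - 1 then
        res.modify cc.2 PySem.Set.empty (fun s =>
          s.add (PySem.List.pyGetD (PySem.List.pyGetD quilt rc.1 []) (cc.1 + 1) 0)) else res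
      let res := if cc.1 > 0 then
        res.modify cc.2 PySem.Set.empty (fun s =>
          s.add (PySem.List.pyGetD (PySem.List.pyGetD quilt rc.1 []) (cc.1 - 1) 0)) else res
      res) res) res
  -- cleanup: keys iterated all exist, so res[key] is a plain read (getD) and .remove = discard under the guard
  let res := res.keys.foldl (fun res key =>
    if (res.getD key PySem.Set.empty).contains key then
      res.insert key (PySem.Set.discard (res.getD key PySem.Set.empty) key)
    else res) res
  res.items

-- ===== PORT B =====
def connections_alt (quilt : List (List Int)) : List (Int × List Int) :=
  let rows : Int := quilt.length
  -- len(quilt[0]) raises IndexError on quilt = []; excluded by Pre_, pyGetD is the total form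
  let cols : Int := (PySem.List.pyGetD quilt 0 []).length
  let pos : PySem.Dict Int (List (Int × Int)) :=
    (PySem.List.enumerate quilt 0).foldl (fun pos rc =>
      (PySem.List.enumerate rc.2 0).foldl (fun pos cc =>
        pos.modify cc.2 [] (fun ps => ps ++ [(rc.1, cc.1)])) pos) PySem.Dict.empty
  let res := pos.items.foldl (fun (res : PySem.Dict Int (PySem.Set Int)) kc =>
    let nbrs : List Int := kc.2.foldl (fun (nbrs : List Int) ij =>
      let nbrs := if ij.1 < rows - 1 then
        nbrs ++ [PySem.List.pyGetD (PySem.List.pyGetD quilt (ij.1 + 1) []) ij.2 0] else nbrs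
      let nbrs := if ij.1 > 0 then
        nbrs ++ [PySem.List.pyGetD (PySem.List.pyGetD quilt (ij.1 - 1) []) ij.2 0] else nbrs
      let nbrs := if ij.2 < cols - 1 then
        nbrs ++ [PySem.List.pyGetD (PySem.List.pyGetD quilt ij.1 []) (ij.2 + 1) 0] else nbrs
      let nbrs := if ij.2 > 0 then
        nbrs ++ [PySem.List.pyGetD (PySem.List.pyGetD quilt ij.1 []) (ij.2 - 1) 0] else nbrs
      nbrs) ([] : List Int)
    if nbrs.isEmpty then res
    else res.insert kc.1 (PySem.Set.diff (PySem.Set.ofList nbrs) (PySem.Set.ofList [kc.1])))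
    PySem.Dict.empty
  res.items

-- ===== PRECONDITION & SPEC =====
-- Pre_ is exactly where the Python A returns: a nonempty quilt whose rows all have the first row's
-- length (on [] A raises IndexError at quilt[0]; on any ragged grid with ≥ 2 rows some neighbour
-- access quilt[i±1][j] or quilt[i][j±1] raises IndexError).
def Pre_connections (quilt : List (List Int)) : Prop :=
  quilt ≠ [] ∧ ∀ row ∈ quilt, row.length = (quilt.headD []).length
instance (quilt : List (List Int)) : Decidable (Pre_connections quilt) := by
  unfold Pre_connections; infer_instance
def pvWitness_connections : List (List Int) := [[1, 2], [3, 1]]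
def Spec_connections (quilt : List (List Int)) (out : List (Int × List Int)) : Prop := out = connections_alt quilt
instance (quilt : List (List Int)) (out : List (Int × List Int)) : Decidable (Spec_connections quilt out) := by unfold Spec_connections; infer_instance

-- ===== CLAIM (what is proved, stated in full; the proofs are below) =====
def Claim_equal_connections : Prop := ∀ (quilt : List (List Int)), Dom_connections quilt → Pre_connections quilt → Spec_connections quilt (connections quilt)

-- ===== LEMMAS AND PROOFS =====

/-- The value of cell (i, j), total form. -/
def qcell (q : List (List Int)) (i j : Nat) : Int := (q.getD i []).getD j 0

/-- The neighbour values of cell (i, j) in A's (and B's) fixed order: down, up, right, left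
(the guarded reads exactly as both ports spell them). -/
def qev (q : List (List Int)) (R C i j : Nat) : List Int :=
  ((if (i : Int) < (R : Int) - 1 then
      [PySem.List.pyGetD (PySem.List.pyGetD q ((i : Int) + 1) []) (j : Int) 0] else []) ++
   (if (i : Int) > 0 then
      [PySem.List.pyGetD (PySem.List.pyGetD q ((i : Int) - 1) []) (j : Int) 0] else [])) ++
  ((if (j : Int) < (C : Int) - 1 then
      [PySem.List.pyGetD (PySem.List.pyGetD q (i : Int) []) ((j : Int) + 1) 0] else []) ++
   (if (j : Int) > 0 then
      [PySem.List.pyGetD (PySem.List.pyGetD q (i : Int) []) ((j : Int) - 1) 0] else []))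

/-- All cell positions in row-major order. -/
def allidx (R C : Nat) : List (Nat × Nat) :=
  (List.range R).flatMap (fun i => (List.range C).map (fun j => (i, j)))

/-- The stream of (cell value, neighbour value) events, in A's traversal order. -/
def qevents (q : List (List Int)) (R C : Nat) : List (Int × Int) :=
  (allidx R C).flatMap (fun p => (qev q R C p.1 p.2).map (fun v => (qcell q p.1 p.2, v)))

/-- B's neighbour list for one value. -/
def qnbrs (q : List (List Int)) (R C : Nat) (k : Int) : List Int :=
  (allidx R C).flatMap (fun p => if qcell q p.1 p.2 = k then qev q R C p.1 p.2 else [])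

/-- One defaultdict(set) event step. -/
def dstep (d : PySem.Dict Int (PySem.Set Int)) (p : Int × Int) : PySem.Dict Int (PySem.Set Int) :=
  d.modify p.1 PySem.Set.empty (fun s => s.add p.2)

/-- The set accumulated for key k by the event stream E. -/
def gval (E : List (Int × Int)) (k : Int) : PySem.Set Int :=
  PySem.Set.ofList ((E.filter (fun p => p.1 == k)).map Prod.snd)

theorem foldl_flatMap_fold {α β γ : Type} (g : α → List β) (f : γ → β → γ) (l : List α) (c : γ) :
    (l.flatMap g).foldl f c = l.foldl (fun c x => (g x).foldl f c) c := by
  induction l generalizing c <;> simp_all [List.foldl_append]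

theorem enum_map {α : Type} (d0 : α) (xs : List α) : ∀ s : Nat,
    PySem.List.enumerate xs (s : Int) =
      (List.range xs.length).map (fun k => (((s + k : Nat) : Int), xs.getD k d0)) := by
  induction xs with
  | nil => intro s; simp [PySem.List.enumerate]
  | cons x t ih =>
    intro s
    rw [PySem.List.enumerate_cons]
    have : ((s : Int) + 1) = ((s + 1 : Nat) : Int) := by push_cast; ring
    rw [this, ih (s + 1)]
    simp [List.range_succ_eq_map, List.map_map, Function.comp]
    intro a _
    omega

theorem enum_map_zero {α : Type} (d0 : α) (xs : List α) :
    PySem.List.enumerate xs 0 =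
      (List.range xs.length).map (fun (k : Nat) => ((k : Int), xs.getD k d0)) := by
  simpa using enum_map d0 xs 0

theorem mkmap_get? {ν : Type} (ks : List Int) (g : Int → ν) (k : Int) :
    (PySem.Dict.mk (ks.map fun x => (x, g x))).get? k = if k ∈ ks then some (g k) else none := by
  induction ks with
  | nil => simp [PySem.Dict.get?]
  | cons a t ih =>
    simp only [List.map_cons, PySem.Dict.get?_mk_cons, ih, List.mem_cons, beq_iff_eq]
    by_cases h : a = k
    · simp [h]
    · simp only [h, if_false]
      by_cases hk : k ∈ t
      · simp [hk]
      · simp only [hk, if_false, or_false]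
        rw [if_neg (by intro hh; exact h hh.symm)]

theorem mkmap_contains {ν : Type} (ks : List Int) (g : Int → ν) (k : Int) :
    (PySem.Dict.mk (ks.map fun x => (x, g x))).contains k = decide (k ∈ ks) := by
  simp only [PySem.Dict.contains, List.any_map, Function.comp_def]
  by_cases h : k ∈ ks
  · simp [h]
  · simp only [h, decide_false, List.any_eq_false]
    intro x hx
    simp only [beq_iff_eq]
    intro hxk; exact h (hxk ▸ hx)

theorem mkmap_insert_mem {ν : Type} (ks : List Int) (g : Int → ν) (k : Int) (v : ν)
    (h : k ∈ ks) :
    (PySem.Dict.mk (ks.map fun x => (x, g x))).insert k v =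
      PySem.Dict.mk (ks.map fun x => (x, if x = k then v else g x)) := by
  simp only [PySem.Dict.insert, mkmap_contains, h, decide_true, if_true, List.map_map]
  congr 1
  apply List.map_congr_left; intro x _
  by_cases hx : x = k <;> simp [hx]

theorem mkmap_insert_not_mem {ν : Type} (ks : List Int) (g : Int → ν) (k : Int) (v : ν)
    (h : k ∉ ks) :
    (PySem.Dict.mk (ks.map fun x => (x, g x))).insert k v =
      PySem.Dict.mk ((ks.map fun x => (x, g x)) ++ [(k, v)]) := by
  simp [PySem.Dict.insert, h]

/-- The value accumulated for key k by folding op over the stream E (generic defaultdict loop). -/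
def mval {β ν : Type} (e0 : ν) (op : ν → β → ν) (E : List (Int × β)) (k : Int) : ν :=
  ((E.filter (fun p => p.1 == k)).map Prod.snd).foldl op e0

theorem mval_append {β ν : Type} (e0 : ν) (op : ν → β → ν) (E : List (Int × β))
    (k : Int) (v : β) (k' : Int) :
    mval e0 op (E ++ [(k, v)]) k' =
      if k' = k then op (mval e0 op E k') v else mval e0 op E k' := by
  by_cases h : k' = k
  · subst h
    simp [mval, List.filter_append, List.foldl_append]
  · have hkk : ¬ ((k, v).1 == k') = true := by simpa using fun hh => h hh.symm
    simp [mval, List.filter_append, hkk, h]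

theorem mval_not_mem {β ν : Type} (e0 : ν) (op : ν → β → ν) (E : List (Int × β))
    (k : Int) (h : k ∉ E.map Prod.fst) : mval e0 op E k = e0 := by
  have : E.filter (fun p => p.1 == k) = [] := by
    rw [List.filter_eq_nil_iff]
    intro p hp
    simp only [beq_iff_eq]
    intro hh
    exact h (hh ▸ List.mem_map_of_mem (f := Prod.fst) hp)
  simp [mval, this]

theorem foldl_mstep_eq {β ν : Type} (e0 : ν) (op : ν → β → ν) (E : List (Int × β)) :
    E.foldl (fun d p => d.modify p.1 e0 (fun s => op s p.2)) PySem.Dict.empty =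
      PySem.Dict.mk ((PySem.List.dedup (E.map Prod.fst)).map (fun k => (k, mval e0 op E k))) := by
  induction E using List.reverseRecOn with
  | nil => rfl
  | append_singleton E p ih =>
    obtain ⟨k, v⟩ := p
    rw [List.foldl_append, List.foldl_cons, List.foldl_nil, ih]
    have hded : PySem.List.dedup ((E ++ [(k, v)]).map Prod.fst) =
        PySem.Set.add (PySem.List.dedup (E.map Prod.fst)) k := by
      simp [PySem.List.dedup, PySem.Set.ofList, List.foldl_append]
    rw [hded]
    by_cases hk : k ∈ PySem.List.dedup (E.map Prod.fst)
    · have hctrue : (PySem.List.dedup (E.map Prod.fst)).contains k = true := by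
        simp only [List.contains_eq_mem, decide_eq_true_eq]
        exact hk
      have hstay : PySem.Set.add (PySem.List.dedup (E.map Prod.fst)) k =
          PySem.List.dedup (E.map Prod.fst) := by
        simp only [PySem.Set.add, PySem.Set.contains, hctrue, if_true]
      rw [hstay]
      show PySem.Dict.modify _ k e0 (fun s => op s v) = _
      rw [PySem.Dict.modify, PySem.Dict.getD, mkmap_get?, if_pos hk]
      rw [mkmap_insert_mem _ _ _ _ hk]
      congr 1
      apply List.map_congr_left; intro x _
      rw [mval_append]
      by_cases hxk : x = k
      · subst hxk; simp
      · simp [hxk]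
    · have hmem : k ∉ E.map Prod.fst := by
        intro hc; exact hk ((PySem.List.mem_dedup _ _).mpr hc)
      have hcfalse : (PySem.List.dedup (E.map Prod.fst)).contains k = false := by
        simp only [List.contains_eq_mem, decide_eq_false_iff_not]
        exact hk
      have happ : PySem.Set.add (PySem.List.dedup (E.map Prod.fst)) k =
          PySem.List.dedup (E.map Prod.fst) ++ [k] := by
        simp only [PySem.Set.add, PySem.Set.contains, hcfalse, Bool.false_eq_true, if_false]
      rw [happ]
      show PySem.Dict.modify _ k e0 (fun s => op s v) = _
      rw [PySem.Dict.modify, PySem.Dict.getD, mkmap_get?, if_neg hk]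
      rw [mkmap_insert_not_mem _ _ _ _ hk]
      congr 1
      rw [List.map_append]
      congr 1
      · apply List.map_congr_left; intro x hx
        rw [mval_append]
        have hxk : ¬ x = k := by rintro rfl; exact hk hx
        simp [hxk]
      · simp only [List.map_cons, List.map_nil]
        rw [mval_append, if_pos rfl, mval_not_mem _ _ E k hmem]
        simp

theorem foldl_dstep_eq (E : List (Int × Int)) :
    E.foldl dstep PySem.Dict.empty =
      PySem.Dict.mk ((PySem.List.dedup (E.map Prod.fst)).map (fun k => (k, gval E k))) :=
  foldl_mstep_eq PySem.Set.empty PySem.Set.add E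

theorem discard_discard (s : PySem.Set Int) (x : Int) :
    PySem.Set.discard (PySem.Set.discard s x) x = PySem.Set.discard s x := by
  simp [PySem.Set.discard, List.filter_filter]

theorem cleanup_fold (ks : List Int) (l : List Int) (g : Int → PySem.Set Int)
    (hsub : ∀ x ∈ l, x ∈ ks) :
    l.foldl (fun res key =>
        if (res.getD key PySem.Set.empty).contains key then
          res.insert key (PySem.Set.discard (res.getD key PySem.Set.empty) key)
        else res) (PySem.Dict.mk (ks.map fun k => (k, g k)))
      = PySem.Dict.mk (ks.map fun k => (k, if k ∈ l then PySem.Set.discard (g k) k else g k)) := by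
  induction l generalizing g with
  | nil => simp
  | cons x t ih =>
    have hx : x ∈ ks := hsub x (by simp)
    rw [List.foldl_cons]
    have hget : (PySem.Dict.mk (ks.map fun k => (k, g k))).getD x PySem.Set.empty = g x := by
      rw [PySem.Dict.getD, mkmap_get?, if_pos hx]; rfl
    have hstep : (if ((PySem.Dict.mk (ks.map fun k => (k, g k))).getD x PySem.Set.empty).contains x then
          (PySem.Dict.mk (ks.map fun k => (k, g k))).insert x
            (PySem.Set.discard ((PySem.Dict.mk (ks.map fun k => (k, g k))).getD x PySem.Set.empty) x)
        else (PySem.Dict.mk (ks.map fun k => (k, g k))))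
        = PySem.Dict.mk (ks.map fun k => (k, if k = x then PySem.Set.discard (g k) k else g k)) := by
      rw [hget]
      by_cases hc : (g x).contains x = true
      · rw [if_pos hc, mkmap_insert_mem _ _ _ _ hx]
        congr 1
        apply List.map_congr_left; intro k _
        by_cases hk : k = x
        · subst hk; simp
        · simp [hk]
      · rw [if_neg hc]
        congr 1
        apply List.map_congr_left; intro k _
        by_cases hk : k = x
        · subst hk
          have hnm : k ∉ (g k : List Int) := by
            intro hm
            exact hc (by simp [PySem.Set.contains, List.contains_eq_mem, hm])
          have : PySem.Set.discard (g k) k = g k := by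
            apply List.filter_eq_self.mpr
            intro y hy
            simpa using fun hyk : y = k => hnm (hyk ▸ hy)
          simp [this]
        · simp [hk]
    rw [hstep, ih _ (fun y hy => hsub y (by simp [hy]))]
    congr 1
    apply List.map_congr_left; intro k _
    by_cases hk : k = x
    · subst hk
      by_cases hkt : k ∈ t <;> simp [hkt, discard_discard]
    · by_cases hkt : k ∈ t <;> simp [hk, hkt]

theorem foldl_skip_insert (l : List Int) (hl : l.Nodup) (c : Int → Bool)
    (v : Int → PySem.Set Int) :
    l.foldl (fun res key => if c key then res else res.insert key (v key))
        (PySem.Dict.empty : PySem.Dict Int (PySem.Set Int))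
      = PySem.Dict.mk ((l.filter (fun k => !c k)).map fun k => (k, v k)) := by
  induction l using List.reverseRecOn with
  | nil => rfl
  | append_singleton t k ih =>
    have hnd : t.Nodup ∧ k ∉ t := by
      rw [List.nodup_append] at hl
      exact ⟨hl.1, fun hc => hl.2.2 k hc k (by simp) rfl⟩
    rw [List.foldl_append, List.foldl_cons, List.foldl_nil, ih hnd.1, List.filter_append]
    by_cases hc : c k = true
    · simp [hc]
    · rw [if_neg hc, mkmap_insert_not_mem]
      · simp [hc]
      · intro hcmem
        exact hnd.2 (List.mem_of_mem_filter hcmem)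

theorem add_contains_self (s : PySem.Set Int) (c : Int) :
    (PySem.Set.add s c).contains c = true := by
  simp only [PySem.Set.add, PySem.Set.contains, List.contains_eq_mem, decide_eq_true_eq]
  by_cases hc : c ∈ s <;> simp [hc]

theorem add_of_contains (s : PySem.Set Int) (c : Int) (h : s.contains c = true) :
    PySem.Set.add s c = s := by
  have hm : c ∈ s := by simpa [PySem.Set.contains, List.contains_eq_mem] using h
  simp [PySem.Set.add, PySem.Set.contains, List.contains_eq_mem, hm]

theorem foldl_add_const {ι : Type} (c : Int) (ys : List ι) :
    ∀ a : PySem.Set Int, a.contains c = true →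
      List.foldl PySem.Set.add a (ys.map fun _ => c) = a := by
  induction ys with
  | nil => intro a _; rfl
  | cons y t ih =>
    intro a ha
    rw [List.map_cons, List.foldl_cons, add_of_contains _ _ ha]
    exact ih a ha

theorem ofList_flatMap_const {ι : Type} (l : List ι) (h : ι → List Int) (g : ι → Int)
    (hne : ∀ x ∈ l, h x ≠ []) (acc : PySem.Set Int) :
    List.foldl PySem.Set.add acc (l.flatMap fun x => (h x).map (fun _ => g x))
      = List.foldl PySem.Set.add acc (l.map g) := by
  induction l generalizing acc with
  | nil => rfl
  | cons x t ih =>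
    rw [List.flatMap_cons, List.map_cons, List.foldl_append, List.foldl_cons]
    obtain ⟨y, ys, hxy⟩ := List.exists_cons_of_ne_nil (hne x (by simp))
    rw [hxy, List.map_cons, List.foldl_cons]
    rw [foldl_add_const _ _ _ (add_contains_self acc (g x))]
    exact ih (fun z hz => hne z (by simp [hz])) _

theorem bodyA_eq (q : List (List Int)) (R C i j : Nat) (c : Int)
    (d : PySem.Dict Int (PySem.Set Int)) :
    (let r1 := if (i : Int) < (R : Int) - 1 then
        d.modify c PySem.Set.empty (fun s =>
          s.add (PySem.List.pyGetD (PySem.List.pyGetD q ((i : Int) + 1) []) (j : Int) 0)) else d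
     let r2 := if (i : Int) > 0 then
        r1.modify c PySem.Set.empty (fun s =>
          s.add (PySem.List.pyGetD (PySem.List.pyGetD q ((i : Int) - 1) []) (j : Int) 0)) else r1
     let r3 := if (j : Int) < (C : Int) - 1 then
        r2.modify c PySem.Set.empty (fun s =>
          s.add (PySem.List.pyGetD (PySem.List.pyGetD q (i : Int) []) ((j : Int) + 1) 0)) else r2
     let r4 := if (j : Int) > 0 then
        r3.modify c PySem.Set.empty (fun s =>
          s.add (PySem.List.pyGetD (PySem.List.pyGetD q (i : Int) []) ((j : Int) - 1) 0)) else r3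
     r4)
    = ((qev q R C i j).map (fun v => (c, v))).foldl dstep d := by
  simp only [qev]
  split_ifs <;> simp [dstep, List.foldl]

theorem allidx_flatMap {β : Type} (R C : Nat) (F : Nat × Nat → List β) :
    (allidx R C).flatMap F
      = (List.range R).flatMap (fun i => (List.range C).flatMap (fun j => F (i, j))) := by
  rw [allidx, List.flatMap_assoc]
  simp [List.flatMap_def, Function.comp_def]

theorem mem_allidx (R C : Nat) (p : Nat × Nat) :
    p ∈ allidx R C ↔ p.1 < R ∧ p.2 < C := by
  obtain ⟨i, j⟩ := p
  simp [allidx, List.mem_flatMap]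

theorem A_pre_fold (q : List (List Int)) (R C : Nat) (hR : q.length = R)
    (hrect : ∀ r ∈ q, r.length = C) (d : PySem.Dict Int (PySem.Set Int)) :
    (PySem.List.enumerate q 0).foldl (fun res rc =>
      (PySem.List.enumerate rc.2 0).foldl (fun res cc =>
        let res := if rc.1 < (R : Int) - 1 then
          res.modify cc.2 PySem.Set.empty (fun s =>
            s.add (PySem.List.pyGetD (PySem.List.pyGetD q (rc.1 + 1) []) cc.1 0)) else res
        let res := if rc.1 > 0 then
          res.modify cc.2 PySem.Set.empty (fun s =>
            s.add (PySem.List.pyGetD (PySem.List.pyGetD q (rc.1 - 1) []) cc.1 0)) else res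
        let res := if cc.1 < (C : Int) - 1 then
          res.modify cc.2 PySem.Set.empty (fun s =>
            s.add (PySem.List.pyGetD (PySem.List.pyGetD q rc.1 []) (cc.1 + 1) 0)) else res
        let res := if cc.1 > 0 then
          res.modify cc.2 PySem.Set.empty (fun s =>
            s.add (PySem.List.pyGetD (PySem.List.pyGetD q rc.1 []) (cc.1 - 1) 0)) else res
        res) res) d
    = (qevents q R C).foldl dstep d := by
  rw [qevents, allidx_flatMap, foldl_flatMap_fold]
  rw [enum_map_zero ([] : List Int) q, List.foldl_map, hR]
  apply PySem.List.foldl_congr_mem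
  intro acc i hi
  rw [foldl_flatMap_fold]
  rw [enum_map_zero (0 : Int) (q.getD i []), List.foldl_map]
  have hmem : q.getD i [] ∈ q := by
    rw [List.getD_eq_getElem q [] (by rw [hR]; simpa using hi)]
    exact List.getElem_mem _
  rw [hrect _ hmem]
  apply PySem.List.foldl_congr_mem
  intro acc2 j hj
  exact bodyA_eq q R C i j ((q.getD i []).getD j 0) acc2

theorem A_normal (q : List (List Int)) (R C : Nat) (hR : q.length = R)
    (hrect : ∀ r ∈ q, r.length = C) (hq : q ≠ []) :
    connections q = (PySem.List.dedup ((qevents q R C).map Prod.fst)).map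
      (fun k => (k, PySem.Set.discard (gval (qevents q R C) k) k)) := by
  have hmem0 : q.getD 0 [] ∈ q := by
    cases q with
    | nil => exact absurd rfl hq
    | cons r t => simp
  have hC0 : (PySem.List.pyGetD q 0 []).length = C := by
    rw [show (0 : Int) = ((0 : Nat) : Int) from rfl, PySem.List.pyGetD_natCast]
    exact hrect _ hmem0
  simp only [connections]
  rw [hC0, hR, A_pre_fold q R C hR hrect, foldl_dstep_eq]
  have hkeys : (PySem.Dict.mk ((PySem.List.dedup ((qevents q R C).map Prod.fst)).map
      (fun k => (k, gval (qevents q R C) k)))).keys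
      = PySem.List.dedup ((qevents q R C).map Prod.fst) := by
    simp [PySem.Dict.keys, List.map_map, Function.comp_def]
  rw [hkeys, cleanup_fold _ _ _ (fun x hx => hx)]
  show List.map _ _ = _
  apply List.map_congr_left
  intro k hk
  rw [if_pos hk]

theorem beq_int_decide (a b : Int) : (a == b) = decide (a = b) := by
  by_cases h : a = b <;> simp [h]

/-- The (value, position) event stream B's first pass folds over, in row-major order. -/
def qposev (q : List (List Int)) (R C : Nat) : List (Int × (Int × Int)) :=
  (allidx R C).map (fun p => (qcell q p.1 p.2, ((p.1 : Int), (p.2 : Int))))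

theorem B_pos_fold (q : List (List Int)) (R C : Nat) (hR : q.length = R)
    (hrect : ∀ r ∈ q, r.length = C) :
    (PySem.List.enumerate q 0).foldl (fun pos rc =>
      (PySem.List.enumerate rc.2 0).foldl (fun pos cc =>
        pos.modify cc.2 [] (fun ps => ps ++ [(rc.1, cc.1)])) pos)
      (PySem.Dict.empty : PySem.Dict Int (List (Int × Int)))
    = (qposev q R C).foldl
        (fun d p => d.modify p.1 [] (fun s => s ++ [p.2])) PySem.Dict.empty := by
  rw [qposev, List.foldl_map, allidx, foldl_flatMap_fold]
  rw [enum_map_zero ([] : List Int) q, List.foldl_map, hR]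
  apply PySem.List.foldl_congr_mem
  intro acc i hi
  rw [List.foldl_map]
  rw [enum_map_zero (0 : Int) (q.getD i []), List.foldl_map]
  have hmem : q.getD i [] ∈ q := by
    rw [List.getD_eq_getElem q [] (by rw [hR]; simpa using hi)]
    exact List.getElem_mem _
  rw [hrect _ hmem]
  rfl

theorem pval_eq (q : List (List Int)) (R C : Nat) (k : Int) :
    mval ([] : List (Int × Int)) (fun s x => s ++ [x]) (qposev q R C) k
      = ((allidx R C).filter (fun p => decide (qcell q p.1 p.2 = k))).map
          (fun p => ((p.1 : Int), (p.2 : Int))) := by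
  rw [mval, qposev, List.filter_map, PySem.List.foldl_append_singleton]
  simp [Function.comp_def, List.map_map, beq_int_decide]

theorem flatMap_if_filter {α β : Type} (l : List α) (P : α → Prop) [DecidablePred P]
    (f : α → List β) :
    l.flatMap (fun x => if P x then f x else [])
      = (l.filter (fun x => decide (P x))).flatMap f := by
  induction l with
  | nil => simp
  | cons a t ih => by_cases h : P a <;> simp [h, ih]

theorem bodyB2_eq (q : List (List Int)) (R C i j : Nat) (nbrs : List Int) :
    (let n1 := if (i : Int) < (R : Int) - 1 then
        nbrs ++ [PySem.List.pyGetD (PySem.List.pyGetD q ((i : Int) + 1) []) (j : Int) 0] else nbrs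
     let n2 := if (i : Int) > 0 then
        n1 ++ [PySem.List.pyGetD (PySem.List.pyGetD q ((i : Int) - 1) []) (j : Int) 0] else n1
     let n3 := if (j : Int) < (C : Int) - 1 then
        n2 ++ [PySem.List.pyGetD (PySem.List.pyGetD q (i : Int) []) ((j : Int) + 1) 0] else n2
     let n4 := if (j : Int) > 0 then
        n3 ++ [PySem.List.pyGetD (PySem.List.pyGetD q (i : Int) []) ((j : Int) - 1) 0] else n3
     n4)
    = nbrs ++ qev q R C i j := by
  simp only [qev]
  split_ifs <;> simp

theorem B_normal (q : List (List Int)) (R C : Nat) (hR : q.length = R)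
    (hrect : ∀ r ∈ q, r.length = C) (hq : q ≠ []) :
    connections_alt q
      = ((PySem.List.dedup ((allidx R C).map (fun p => qcell q p.1 p.2))).filter
          (fun k => !(qnbrs q R C k).isEmpty)).map
        (fun k => (k, PySem.Set.diff (PySem.Set.ofList (qnbrs q R C k))
          (PySem.Set.ofList [k]))) := by
  have hmem0 : q.getD 0 [] ∈ q := by
    cases q with
    | nil => exact absurd rfl hq
    | cons r t => simp
  have hC0 : (PySem.List.pyGetD q 0 []).length = C := by
    rw [show (0 : Int) = ((0 : Nat) : Int) from rfl, PySem.List.pyGetD_natCast]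
    exact hrect _ hmem0
  simp only [connections_alt]
  rw [hC0, hR]
  rw [B_pos_fold q R C hR hrect,
    foldl_mstep_eq ([] : List (Int × Int)) (fun s x => s ++ [x]) (qposev q R C)]
  have hk : (qposev q R C).map Prod.fst = (allidx R C).map (fun p => qcell q p.1 p.2) := by
    simp [qposev, List.map_map, Function.comp_def]
  rw [hk]
  show (((PySem.List.dedup ((allidx R C).map (fun p => qcell q p.1 p.2))).map
      (fun k => (k, mval ([] : List (Int × Int)) (fun s x => s ++ [x])
        (qposev q R C) k))).foldl _ PySem.Dict.empty).items = _
  rw [List.foldl_map]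
  refine congrArg PySem.Dict.items (Eq.trans (PySem.List.foldl_congr_mem _ _
      (fun res k => if (qnbrs q R C k).isEmpty then res
        else res.insert k (PySem.Set.diff (PySem.Set.ofList (qnbrs q R C k))
          (PySem.Set.ofList [k]))) _ ?_)
    (foldl_skip_insert _ (PySem.List.nodup_dedup _) _ _))
  intro acc k _
  have hnb : (mval ([] : List (Int × Int)) (fun s x => s ++ [x]) (qposev q R C) k).foldl
      (fun (nbrs : List Int) ij =>
        let nbrs := if ij.1 < (R : Int) - 1 then
          nbrs ++ [PySem.List.pyGetD (PySem.List.pyGetD q (ij.1 + 1) []) ij.2 0] else nbrs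
        let nbrs := if ij.1 > 0 then
          nbrs ++ [PySem.List.pyGetD (PySem.List.pyGetD q (ij.1 - 1) []) ij.2 0] else nbrs
        let nbrs := if ij.2 < (C : Int) - 1 then
          nbrs ++ [PySem.List.pyGetD (PySem.List.pyGetD q ij.1 []) (ij.2 + 1) 0] else nbrs
        let nbrs := if ij.2 > 0 then
          nbrs ++ [PySem.List.pyGetD (PySem.List.pyGetD q ij.1 []) (ij.2 - 1) 0] else nbrs
        nbrs) ([] : List Int)
      = qnbrs q R C k := by
    rw [pval_eq, List.foldl_map]
    refine Eq.trans (PySem.List.foldl_congr_mem _ _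
        (fun nbrs (p : Nat × Nat) => nbrs ++ qev q R C p.1 p.2) _ ?_) ?_
    · intro acc2 p _
      exact bodyB2_eq q R C p.1 p.2 acc2
    · rw [PySem.List.foldl_append_eq_flatMap, qnbrs, flatMap_if_filter]
      simp
  rw [hnb]

theorem qev_ne_nil (q : List (List Int)) (R C i j : Nat) (hi : i < R) (hj : j < C)
    (hbig : 2 ≤ R ∨ 2 ≤ C) : qev q R C i j ≠ [] := by
  have h : ((i : Int) < (R : Int) - 1) ∨ ((i : Int) > 0) ∨
      ((j : Int) < (C : Int) - 1) ∨ ((j : Int) > 0) := by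
    rcases hbig with h | h <;> omega
  rcases h with h | h | h | h <;> simp [qev, h] <;> omega

theorem flat_filter_map {ι : Type} (l : List ι) (f : ι → List (Int × Int)) (g : ι → List Int)
    (p : Int × Int → Bool) (h : ∀ x, ((f x).filter p).map Prod.snd = g x) :
    ((l.flatMap f).filter p).map Prod.snd = l.flatMap g := by
  induction l with
  | nil => simp
  | cons a t ih => simp [List.filter_append, h a, ih]

theorem gval_eq_nbrs (q : List (List Int)) (R C : Nat) (k : Int) :
    gval (qevents q R C) k = PySem.Set.ofList (qnbrs q R C k) := by
  rw [gval, qevents, qnbrs]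
  congr 1
  apply flat_filter_map
  intro p
  by_cases h : qcell q p.1 p.2 = k
  · simp [List.filter_map, Function.comp_def, h, List.map_map]
  · simp [List.filter_map, Function.comp_def, h]

theorem discard_eq_diff (l : List Int) (k : Int) :
    PySem.Set.discard (PySem.Set.ofList l) k
      = PySem.Set.diff (PySem.Set.ofList l) (PySem.Set.ofList [k]) := by
  rw [PySem.Set.discard, PySem.Set.diff]
  apply List.filter_congr
  intro y _
  have h1 : (PySem.Set.ofList [k] : List Int) = [k] := rfl
  rw [h1]
  by_cases h : y = k <;> simp [h, List.contains_eq_mem]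

theorem AB_link (q : List (List Int)) (R C : Nat) (hR : q.length = R) (hq : q ≠ []) :
    (PySem.List.dedup ((qevents q R C).map Prod.fst)).map
        (fun k => (k, PySem.Set.discard (gval (qevents q R C) k) k))
      = ((PySem.List.dedup ((allidx R C).map (fun p => qcell q p.1 p.2))).filter
          (fun k => !(qnbrs q R C k).isEmpty)).map
        (fun k => (k, PySem.Set.diff (PySem.Set.ofList (qnbrs q R C k))
          (PySem.Set.ofList [k]))) := by
  by_cases hbig : 2 ≤ R ∨ 2 ≤ C
  · have hne : ∀ p ∈ allidx R C, qev q R C p.1 p.2 ≠ [] := by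
      intro p hp
      obtain ⟨h1, h2⟩ := (mem_allidx R C p).mp hp
      exact qev_ne_nil q R C p.1 p.2 h1 h2 hbig
    have hkeys : PySem.List.dedup ((qevents q R C).map Prod.fst)
        = PySem.List.dedup ((allidx R C).map (fun p => qcell q p.1 p.2)) := by
      have hmap : (qevents q R C).map Prod.fst
          = (allidx R C).flatMap (fun p => (qev q R C p.1 p.2).map
              (fun _ => qcell q p.1 p.2)) := by
        simp [qevents, List.map_flatMap, List.map_map, Function.comp_def]
      rw [hmap]
      show PySem.Set.ofList _ = PySem.Set.ofList _
      rw [PySem.Set.ofList, PySem.Set.ofList]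
      exact ofList_flatMap_const (allidx R C) _ _ hne _
    have hfilter : (PySem.List.dedup ((allidx R C).map (fun p => qcell q p.1 p.2))).filter
        (fun k => !(qnbrs q R C k).isEmpty)
        = PySem.List.dedup ((allidx R C).map (fun p => qcell q p.1 p.2)) := by
      apply List.filter_eq_self.mpr
      intro k hk
      have hk2 : k ∈ (allidx R C).map (fun p => qcell q p.1 p.2) :=
        (PySem.List.mem_dedup _ _).mp hk
      obtain ⟨p, hp, hpk⟩ := List.mem_map.mp hk2
      have hnil : qnbrs q R C k ≠ [] := by
        intro hnil
        rw [qnbrs, List.flatMap_eq_nil_iff] at hnil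
        have hb := hnil p hp
        rw [if_pos hpk] at hb
        exact hne p hp hb
      simp [hnil]
    rw [hkeys, hfilter]
    apply List.map_congr_left
    intro k _
    rw [gval_eq_nbrs, discard_eq_diff]
  · have hR1 : R = 1 := by
      have h1 : 0 < q.length := List.length_pos_of_ne_nil hq
      omega
    have hae : ∀ p ∈ allidx R C, qev q R C p.1 p.2 = [] := by
      intro p hp
      obtain ⟨h1, h2⟩ := (mem_allidx R C p).mp hp
      have hc1 : C = 1 := by omega
      have hp1 : p.1 = 0 := by omega
      have hp2 : p.2 = 0 := by omega
      rw [hR1, hc1, hp1, hp2]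
      norm_num [qev]
    have hE : qevents q R C = [] := by
      rw [qevents, List.flatMap_eq_nil_iff]
      intro p hp
      simp [hae p hp]
    have hnb : ∀ k, qnbrs q R C k = [] := by
      intro k
      rw [qnbrs, List.flatMap_eq_nil_iff]
      intro p hp
      simp [hae p hp]
    rw [hE]
    simp [hnb, PySem.List.dedup, PySem.Set.ofList]

-- ===== VERDICT (by name: the statement is the Claim_ definition above) =====
theorem connections_spec : Claim_equal_connections := by
  unfold Claim_equal_connections
  intro quilt _ hpre
  unfold Spec_connections
  obtain ⟨hq, hrect⟩ := hpre
  rw [A_normal quilt quilt.length ((quilt.headD []).length) rfl hrect hq,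
      B_normal quilt quilt.length ((quilt.headD []).length) rfl hrect hq,
      AB_link quilt quilt.length ((quilt.headD []).length) rfl hq]
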